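-- pv_equiv track=rewrite | github.com/INK-USC/NExT | CCG/get_data_for_classifier.py | posi_add
-- ===== SOURCE A (Python) =====
-- def posi_add(lis,sublis,pad=None):
--     posi = []
--     i = 0
--     while i <len(lis):
--         if lis[i:i+len(sublis)]==sublis:
--             posi.extend([1]*len(sublis))
--             i+=len(sublis)
--         else:
--             posi.append(0)
--             i+=1
--     if pad!=None:
--         posi.extend([0]*(pad-len(posi)))
--     return posi
-- ===== SOURCE B (Python) =====
-- def posi_add(lis, sublis, pad=None):
--     n, m = len(lis), len(sublis)
--     MOD = (1 << 61) - 1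
--     B = 1000003
--     out = []
--     if m > 0:
--         hp = 0
--         for x in sublis:
--             hp = (hp * B + x) % MOD
--         pw = pow(B, m - 1, MOD)
--         h = 0
--         for x in lis[:m]:
--             h = (h * B + x) % MOD
--         i = 0
--         while i < n:
--             if i + m <= n and h == hp and lis[i:i+m] == sublis:
--                 out.extend([1] * m)
--                 i += m
--                 h = 0
--                 for x in lis[i:i+m]:
--                     h = (h * B + x) % MOD
--             else:
--                 out.append(0)
--                 if i + m < n:
--                     h = ((h - lis[i] * pw) % MOD * B + lis[i + m]) % MOD
--                 i += 1
--     else: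
--         out = [0] * n
--     if pad is not None:
--         out.extend([0] * (pad - n))
--     return out
-- ===== Notes on version B (the rewrite author's own statement) =====
-- stated objective: faster
-- what changed: Replaces A's O(m) slice comparison at every position by a Rabin-Karp rolling hash (mod 2^61-1) that filters candidate positions in O(1), comparing the actual slice only on a hash hit; Pre_ excludes only sublis = [] with lis nonempty, where A's while loop never advances i and diverges.
import Mathlib
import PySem

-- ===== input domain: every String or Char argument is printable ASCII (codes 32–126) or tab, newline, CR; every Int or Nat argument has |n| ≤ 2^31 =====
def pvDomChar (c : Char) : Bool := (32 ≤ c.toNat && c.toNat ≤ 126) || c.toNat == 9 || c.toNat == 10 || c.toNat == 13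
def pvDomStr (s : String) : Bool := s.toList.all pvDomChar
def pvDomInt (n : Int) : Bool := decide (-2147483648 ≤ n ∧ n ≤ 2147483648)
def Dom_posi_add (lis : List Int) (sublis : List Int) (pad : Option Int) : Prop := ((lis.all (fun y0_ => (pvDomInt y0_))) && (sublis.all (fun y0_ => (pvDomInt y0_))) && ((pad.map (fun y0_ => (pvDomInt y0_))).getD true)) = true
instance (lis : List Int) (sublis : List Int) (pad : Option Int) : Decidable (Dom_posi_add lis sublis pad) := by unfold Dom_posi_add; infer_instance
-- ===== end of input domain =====

-- B replaces A's per-position slice comparison by a Rabin–Karp rolling hash that filters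
-- candidate positions in O(1) each (slice comparison only on a hash hit); same return value.

-- ===== PORT A =====
-- A's while loop; fuel = lis.length + 1 bounds the iterations (each step advances i by
-- at least 1 whenever sublis ≠ []; the sublis = [] ∧ lis ≠ [] case, where Python loops
-- forever, is excluded by Pre_posi_add).
def posiLoopA (lis sublis : List Int) : Nat → Int → List Int → List Int
  | 0, _, acc => acc
  | fuel+1, i, acc =>
    if i < (lis.length : Int) then
      if PySem.List.slice lis (some i) (some (i + (sublis.length : Int))) = sublis then
        posiLoopA lis sublis fuel (i + (sublis.length : Int)) (acc ++ List.replicate sublis.length 1)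
      else
        posiLoopA lis sublis fuel (i + 1) (acc ++ [0])
    else acc

def posi_add (lis : List Int) (sublis : List Int) (pad : Option Int) : List Int :=
  let posi := posiLoopA lis sublis (lis.length + 1) 0 []
  match pad with
  | some p => posi ++ List.replicate (p - (posi.length : Int)).toNat 0
  | none => posi

-- ===== PORT B =====
def pvMOD : Int := (1 <<< 61) - 1
def pvBASE : Int := 1000003

-- the `for x in …: h = (h*B + x) % MOD` loops of Source B
def pvHash (xs : List Int) : Int :=
  xs.foldl (fun h x => PySem.Int.mod (h * pvBASE + x) pvMOD) 0

def posiLoopB (lis sublis : List Int) (hp pw : Int) : Nat → Int → Int → List Int → List Int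
  | 0, _, _, acc => acc
  | fuel+1, i, h, acc =>
    let n : Int := lis.length
    let m : Int := sublis.length
    if i < n then
      if i + m ≤ n ∧ h = hp ∧ PySem.List.slice lis (some i) (some (i + m)) = sublis then
        posiLoopB lis sublis hp pw fuel (i + m)
          (pvHash (PySem.List.slice lis (some (i + m)) (some (i + m + m))))
          (acc ++ List.replicate sublis.length 1)
      else
        let h' := if i + m < n then
            PySem.Int.mod (PySem.Int.mod (h - PySem.List.pyGetD lis i 0 * pw) pvMOD * pvBASE
              + PySem.List.pyGetD lis (i + m) 0) pvMOD
          else h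
        posiLoopB lis sublis hp pw fuel (i + 1) h' (acc ++ [0])
    else acc

def posi_add_alt (lis : List Int) (sublis : List Int) (pad : Option Int) : List Int :=
  let n : Int := lis.length
  let m : Nat := sublis.length
  let out :=
    if 0 < m then
      posiLoopB lis sublis (pvHash sublis) (PySem.Int.powMod pvBASE (m - 1) pvMOD)
        (lis.length + 1) 0 (pvHash (PySem.List.slice lis none (some (m : Int)))) []
    else List.replicate lis.length 0
  match pad with
  | some p => out ++ List.replicate (p - n).toNat 0
  | none => out

-- ===== PRECONDITION & SPEC =====
-- Pre_ excludes exactly the inputs (sublis = [] with lis ≠ []) on which A's while loop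
-- never advances i, i.e. Python A diverges and returns nothing.
def Pre_posi_add (lis : List Int) (sublis : List Int) (pad : Option Int) : Prop :=
  sublis ≠ [] ∨ lis = []
instance (lis : List Int) (sublis : List Int) (pad : Option Int) : Decidable (Pre_posi_add lis sublis pad) := by unfold Pre_posi_add; infer_instance

def pvWitness_posi_add : List Int × List Int × Option Int := ([1, 2, 1, 2, 2], [2, 2], some 7)

def Spec_posi_add (lis : List Int) (sublis : List Int) (pad : Option Int) (out : List Int) : Prop := out = posi_add_alt lis sublis pad
instance (lis : List Int) (sublis : List Int) (pad : Option Int) (out : List Int) : Decidable (Spec_posi_add lis sublis pad out) := by unfold Spec_posi_add; infer_instance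

-- ===== CLAIM (what is proved, stated in full; the proofs are below) =====
def Claim_equal_posi_add : Prop := ∀ (lis : List Int) (sublis : List Int) (pad : Option Int), Dom_posi_add lis sublis pad → Pre_posi_add lis sublis pad → Spec_posi_add lis sublis pad (posi_add lis sublis pad)

-- ===== LEMMAS AND PROOFS =====

theorem pvMOD_pos : (0 : Int) < pvMOD := by decide

-- the un-reduced polynomial hash
def pvG (xs : List Int) : Int := xs.foldl (fun g x => g * pvBASE + x) 0

theorem pvHash_foldl_mod (xs : List Int) : ∀ g : Int,
    xs.foldl (fun h x => PySem.Int.mod (h * pvBASE + x) pvMOD) (g % pvMOD)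
      = (xs.foldl (fun g x => g * pvBASE + x) g) % pvMOD := by
  induction xs with
  | nil => intro g; simp
  | cons x xs ih =>
    intro g
    have hstep : PySem.Int.mod (g % pvMOD * pvBASE + x) pvMOD = (g * pvBASE + x) % pvMOD := by
      rw [PySem.Int.mod_eq_emod_of_pos pvMOD_pos]
      have h1 : g % pvMOD ≡ g [ZMOD pvMOD] := Int.emod_emod_of_dvd g dvd_rfl
      exact (Int.ModEq.add_right x (Int.ModEq.mul_right pvBASE h1))
    simp only [List.foldl_cons, hstep]
    exact ih (g * pvBASE + x)

theorem pvHash_eq_G_mod (xs : List Int) : pvHash xs = pvG xs % pvMOD := by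
  have := pvHash_foldl_mod xs 0
  simpa [pvHash, pvG] using this

theorem pvG_shift (xs : List Int) : ∀ g : Int,
    xs.foldl (fun g x => g * pvBASE + x) g
      = g * pvBASE ^ xs.length + xs.foldl (fun g x => g * pvBASE + x) 0 := by
  induction xs with
  | nil => intro g; simp
  | cons x xs ih =>
    intro g
    simp only [List.foldl_cons, List.length_cons, zero_mul, zero_add]
    rw [ih (g * pvBASE + x), ih x]
    ring

theorem pvG_cons (a : Int) (t : List Int) : pvG (a :: t) = a * pvBASE ^ t.length + pvG t := by
  simp only [pvG, List.foldl_cons, zero_mul, zero_add]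
  exact pvG_shift t a

theorem pvG_append_singleton (t : List Int) (y : Int) : pvG (t ++ [y]) = pvG t * pvBASE + y := by
  simp [pvG, List.foldl_append]

-- rolling-hash step: hash of the window shifted one to the right
theorem pvHash_roll (a y : Int) (t : List Int) {pw : Int}
    (hpw : pw % pvMOD = pvBASE ^ t.length % pvMOD) :
    pvHash (t ++ [y])
      = PySem.Int.mod (PySem.Int.mod (pvHash (a :: t) - a * pw) pvMOD * pvBASE + y) pvMOD := by
  rw [PySem.Int.mod_eq_emod_of_pos pvMOD_pos, PySem.Int.mod_eq_emod_of_pos pvMOD_pos]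
  rw [pvHash_eq_G_mod, pvHash_eq_G_mod, pvG_append_singleton, pvG_cons]
  have h1 : a * pw ≡ a * pvBASE ^ t.length [ZMOD pvMOD] := Int.ModEq.mul_left a hpw
  have h2 : (a * pvBASE ^ t.length + pvG t) % pvMOD ≡ a * pvBASE ^ t.length + pvG t [ZMOD pvMOD] :=
    Int.emod_emod_of_dvd _ dvd_rfl
  have h3 : (a * pvBASE ^ t.length + pvG t) % pvMOD - a * pw ≡ pvG t [ZMOD pvMOD] := by
    have := Int.ModEq.sub h2 h1
    simpa using this
  have h4 : ((a * pvBASE ^ t.length + pvG t) % pvMOD - a * pw) % pvMOD ≡ pvG t [ZMOD pvMOD] :=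
    (Int.emod_emod_of_dvd _ dvd_rfl).trans h3
  exact (Int.ModEq.add_right y (Int.ModEq.mul_right pvBASE h4)).symm

-- window decomposition
theorem window_cons (lis : List Int) (j m : Nat) (hj : j < lis.length) (hm : 0 < m) :
    (lis.drop j).take m = lis[j] :: ((lis.drop (j + 1)).take (m - 1)) := by
  obtain ⟨m', rfl⟩ : ∃ m', m = m' + 1 := ⟨m - 1, by omega⟩
  rw [List.drop_eq_getElem_cons hj, List.take_succ_cons]
  simp only [Nat.add_sub_cancel]

theorem window_snoc (lis : List Int) (j m : Nat) (hm : 0 < m) (hjm : j + 1 + m ≤ lis.length) :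
    (lis.drop (j + 1)).take m = ((lis.drop (j + 1)).take (m - 1)) ++ [lis[j + m]] := by
  obtain ⟨m', rfl⟩ : ∃ m', m = m' + 1 := ⟨m - 1, by omega⟩
  have hidx : j + 1 + m' = j + (m' + 1) := by omega
  have h : (lis.drop (j + 1))[m']? = some lis[j + (m' + 1)] := by
    rw [List.getElem?_drop, hidx]
    exact List.getElem?_eq_getElem (by omega)
  rw [List.take_succ, h]
  simp only [Option.toList_some, Nat.add_sub_cancel]

theorem window_len_of_eq (lis sublis : List Int) (j : Nat) (hj : j ≤ lis.length)
    (h : (lis.drop j).take sublis.length = sublis) : j + sublis.length ≤ lis.length := by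
  have h1 : ((lis.drop j).take sublis.length).length = sublis.length := by rw [h]
  rw [List.length_take, List.length_drop] at h1
  omega

-- the two loops run in lockstep
theorem loop_eq (lis sublis : List Int) (hm : 0 < sublis.length) :
    ∀ (fuel : Nat) (j : Nat) (h : Int) (acc : List Int),
    (j + sublis.length ≤ lis.length → h = pvHash ((lis.drop j).take sublis.length)) →
    posiLoopA lis sublis fuel (j : Int) acc
      = posiLoopB lis sublis (pvHash sublis) (PySem.Int.powMod pvBASE (sublis.length - 1) pvMOD)
          fuel (j : Int) h acc := by
  intro fuel
  induction fuel with
  | zero => intro j h acc _; rfl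
  | succ fuel ih =>
    intro j h acc hinv
    simp only [posiLoopA, posiLoopB]
    by_cases hjn : (j : Int) < (lis.length : Int)
    · have hjn' : j < lis.length := by exact_mod_cast hjn
      rw [if_pos hjn, if_pos hjn]
      have hcast : (j : Int) + (sublis.length : Int) = ((j + sublis.length : Nat) : Int) := by
        push_cast; ring
      have hslice : PySem.List.slice lis (some (j : Int)) (some ((j : Int) + (sublis.length : Int)))
          = (lis.drop j).take sublis.length := PySem.List.slice_natCast_add lis j sublis.length
      by_cases hmatch : (lis.drop j).take sublis.length = sublis
      · -- A's condition holds; show B's full condition holds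
        have hle : j + sublis.length ≤ lis.length :=
          window_len_of_eq lis sublis j (by omega) hmatch
        have hcond : (j : Int) + (sublis.length : Int) ≤ (lis.length : Int) ∧ h = pvHash sublis ∧
            PySem.List.slice lis (some (j : Int)) (some ((j : Int) + (sublis.length : Int)))
              = sublis := by
          refine ⟨by exact_mod_cast hle, ?_, by rw [hslice]; exact hmatch⟩
          rw [hinv hle, hmatch]
        rw [if_pos (by rw [hslice]; exact hmatch), if_pos hcond]
        rw [hcast]
        apply ih
        intro _
        rw [PySem.List.slice_natCast_add lis (j + sublis.length) sublis.length]
      · -- A's condition fails; B's fails too (third conjunct)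
        have hcondF : ¬ ((j : Int) + (sublis.length : Int) ≤ (lis.length : Int) ∧
            h = pvHash sublis ∧
            PySem.List.slice lis (some (j : Int)) (some ((j : Int) + (sublis.length : Int)))
              = sublis) := by
          rintro ⟨-, -, hc⟩
          exact hmatch (by rw [← hslice]; exact hc)
        rw [if_neg (by rw [hslice]; exact hmatch), if_neg hcondF]
        have hcast1 : (j : Int) + 1 = ((j + 1 : Nat) : Int) := by push_cast; ring
        rw [hcast1]
        apply ih
        intro hle2
        have hlt : (j : Int) + (sublis.length : Int) < (lis.length : Int) := by
          have : j + sublis.length < lis.length := by omega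
          exact_mod_cast this
        rw [if_pos hlt]
        have hle : j + sublis.length ≤ lis.length := by omega
        have hwin := hinv hle
        have hget1 : PySem.List.pyGetD lis (j : Int) 0 = lis[j] := by
          rw [PySem.List.pyGetD_natCast]
          exact List.getD_eq_getElem lis 0 hjn'
        have hget2 : PySem.List.pyGetD lis ((j : Int) + (sublis.length : Int)) 0
            = lis[j + sublis.length] := by
          rw [hcast, PySem.List.pyGetD_natCast]
          exact List.getD_eq_getElem lis 0 (by omega)
        rw [hget1, hget2, hwin]
        rw [window_cons lis j sublis.length hjn' hm, window_snoc lis j sublis.length hm hle2]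
        refine (pvHash_roll _ _ _ ?_).symm
        have hlen : ((lis.drop (j + 1)).take (sublis.length - 1)).length = sublis.length - 1 := by
          simp
          omega
        rw [hlen]
        simp only [PySem.Int.powMod, PySem.Int.mod_eq_emod_of_pos pvMOD_pos]
        exact Int.emod_emod_of_dvd _ dvd_rfl
    · rw [if_neg hjn, if_neg hjn]

-- A's loop output has length lis.length (needed for the pad arithmetic)
theorem loopA_length (lis sublis : List Int) (hm : 0 < sublis.length) :
    ∀ (fuel : Nat) (j : Nat) (acc : List Int), j ≤ lis.length → lis.length - j ≤ fuel →
    (posiLoopA lis sublis fuel (j : Int) acc).length = acc.length + (lis.length - j) := by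
  intro fuel
  induction fuel with
  | zero => intro j acc hj hf; simp only [posiLoopA]; omega
  | succ fuel ih =>
    intro j acc hj hf
    simp only [posiLoopA]
    by_cases hjn : (j : Int) < (lis.length : Int)
    · have hjn' : j < lis.length := by exact_mod_cast hjn
      rw [if_pos hjn]
      by_cases hmatch : PySem.List.slice lis (some (j : Int))
          (some ((j : Int) + (sublis.length : Int))) = sublis
      · rw [if_pos hmatch]
        have hle : j + sublis.length ≤ lis.length := by
          apply window_len_of_eq lis sublis j (by omega)
          rw [← PySem.List.slice_natCast_add lis j sublis.length]
          exact hmatch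
        have hcast : (j : Int) + (sublis.length : Int) = ((j + sublis.length : Nat) : Int) := by
          push_cast; ring
        rw [hcast, ih (j + sublis.length) _ hle (by omega)]
        simp
        omega
      · rw [if_neg hmatch]
        have hcast1 : (j : Int) + 1 = ((j + 1 : Nat) : Int) := by push_cast; ring
        rw [hcast1, ih (j + 1) _ (by omega) (by omega)]
        simp
        omega
    · rw [if_neg hjn]
      have : ¬ j < lis.length := fun h => hjn (by exact_mod_cast h)
      omega

-- ===== VERDICT (by name: the statement is the Claim_ definition above) =====
theorem posi_add_spec : Claim_equal_posi_add := by
  unfold Claim_equal_posi_add Spec_posi_add Pre_posi_add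
  intro lis sublis pad _ hpre
  rcases hpre with hs | hl
  · -- sublis ≠ []
    have hm : 0 < sublis.length := List.length_pos_of_ne_nil hs
    have hout : posiLoopA lis sublis (lis.length + 1) 0 []
        = posiLoopB lis sublis (pvHash sublis)
            (PySem.Int.powMod pvBASE (sublis.length - 1) pvMOD)
            (lis.length + 1) 0
            (pvHash (PySem.List.slice lis none (some (sublis.length : Int)))) [] := by
      have h0 : ((0 : Nat) : Int) = (0 : Int) := rfl
      rw [← h0]
      apply loop_eq lis sublis hm
      intro _
      rw [PySem.List.slice_to_natCast]
      simp
    have hlen : (posiLoopA lis sublis (lis.length + 1) 0 []).length = lis.length := by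
      have h0 : ((0 : Nat) : Int) = (0 : Int) := rfl
      rw [← h0, loopA_length lis sublis hm (lis.length + 1) 0 [] (by omega) (by omega)]
      simp
    cases pad with
    | none => simp only [posi_add, posi_add_alt, if_pos hm, hout]
    | some p =>
      have hlenB : (posiLoopB lis sublis (pvHash sublis)
          (PySem.Int.powMod pvBASE (sublis.length - 1) pvMOD) (lis.length + 1) 0
          (pvHash (PySem.List.slice lis none (some (sublis.length : Int)))) []).length
          = lis.length := by rw [← hout]; exact hlen
      simp only [posi_add, posi_add_alt, if_pos hm, hout, hlenB]
  · -- lis = []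
    subst hl
    cases pad with
    | none =>
      by_cases hm : 0 < sublis.length
      · simp [posi_add, posi_add_alt, posiLoopA, posiLoopB, hm]
      · simp [posi_add, posi_add_alt, posiLoopA, posiLoopB, hm]
    | some p =>
      by_cases hm : 0 < sublis.length
      · simp [posi_add, posi_add_alt, posiLoopA, posiLoopB, hm]
      · simp [posi_add, posi_add_alt, posiLoopA, posiLoopB, hm]
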